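-- pv_equiv track=rewrite | github.com/jcolazo8855/chinchon_mp | server.py | deadwood
-- ===== SOURCE A (Python) =====
-- from itertools import combinations
-- from itertools import combinations
--
-- VALUES = [1, 2, 3, 4, 5, 6, 7, 10, 11, 12]   # no 8 or 9 in Spanish deck
--
-- def vpoints(v: int) -> int:
--     return {1:1, 2:2, 3:3, 4:4, 5:5, 6:6, 7:7, 10:10, 11:10, 12:10}[v]
--
-- def _rank(v: int) -> int:
--     return VALUES.index(v)
--
-- def is_group(cards: list) -> bool:
--     return len(cards) >= 3 and len(set(c['v'] for c in cards)) == 1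
--
-- def is_sequence(cards: list) -> bool:
--     if len(cards) < 3:
--         return False
--     if len(set(c['s'] for c in cards)) != 1:
--         return False
--     rnks = sorted(_rank(c['v']) for c in cards)
--     return all(rnks[i+1] == rnks[i] + 1 for i in range(len(rnks) - 1))
--
-- def is_meld(cards: list) -> bool:
--     return bool(cards) and (is_group(cards) or is_sequence(cards))
--
-- def deadwood(hand: list) -> tuple[int, list]:
--     """Return (min_penalty, unmatched_cards) for a 7-card hand."""
--     best_pen = sum(vpoints(c['v']) for c in hand)
--     best_rem = hand[:]
--
--     for sz in range(3, 8):
--         for idx in combinations(range(len(hand)), sz):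
--             sub = [hand[i] for i in idx]
--             if not is_meld(sub):
--                 continue
--             rem = [hand[i] for i in range(len(hand)) if i not in idx]
--             pen = sum(vpoints(c['v']) for c in rem)
--             if pen < best_pen:
--                 best_pen, best_rem = pen, rem
--
--     for sz1 in range(3, 5):
--         for idx1 in combinations(range(len(hand)), sz1):
--             m1 = [hand[i] for i in idx1]
--             if not is_meld(m1):
--                 continue
--             rem1 = [i for i in range(len(hand)) if i not in idx1]
--             for sz2 in range(3, len(rem1) + 1):
--                 for sub2 in combinations(range(len(rem1)), sz2):
--                     m2 = [hand[rem1[j]] for j in sub2]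
--                     if not is_meld(m2):
--                         continue
--                     used = set(idx1) | {rem1[j] for j in sub2}
--                     rem  = [hand[i] for i in range(len(hand)) if i not in used]
--                     pen  = sum(vpoints(c['v']) for c in rem)
--                     if pen < best_pen:
--                         best_pen, best_rem = pen, rem
--
--     return best_pen, best_rem
-- ===== SOURCE B (Python) =====
-- # B: same answer by a different decomposition: build the meld table once (all
-- # index-subsets passing is_meld, sizes ascending, lex order), then scan singles
-- # and ordered disjoint pairs of table entries; A re-enumerates and re-tests
-- # every subset of every remainder instead.
-- from itertools import combinations
--
-- VALUES = [1, 2, 3, 4, 5, 6, 7, 10, 11, 12]   # no 8 or 9 in Spanish deck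
--
-- def vpoints(v: int) -> int:
--     return {1:1, 2:2, 3:3, 4:4, 5:5, 6:6, 7:7, 10:10, 11:10, 12:10}[v]
--
-- def _rank(v: int) -> int:
--     return VALUES.index(v)
--
-- def is_group(cards: list) -> bool:
--     return len(cards) >= 3 and len(set(c['v'] for c in cards)) == 1
--
-- def is_sequence(cards: list) -> bool:
--     if len(cards) < 3:
--         return False
--     if len(set(c['s'] for c in cards)) != 1:
--         return False
--     rnks = sorted(_rank(c['v']) for c in cards)
--     return all(rnks[i+1] == rnks[i] + 1 for i in range(len(rnks) - 1))
--
-- def is_meld(cards: list) -> bool: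
--     return bool(cards) and (is_group(cards) or is_sequence(cards))
--
-- def deadwood(hand: list) -> tuple[int, list]:
--     """Return (min_penalty, unmatched_cards) for a 7-card hand."""
--     n = len(hand)
--     melds = [idx for sz in range(3, n + 1)
--                  for idx in combinations(range(n), sz)
--                  if is_meld([hand[i] for i in idx])]
--     best_pen = sum(vpoints(c['v']) for c in hand)
--     best_rem = hand[:]
--     for idx in melds:
--         if len(idx) > 7:        # single melds beyond 7 cards are out of scope (7-card hand)
--             continue
--         rem = [hand[i] for i in range(n) if i not in idx]
--         pen = sum(vpoints(c['v']) for c in rem)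
--         if pen < best_pen:
--             best_pen, best_rem = pen, rem
--     for idx1 in melds:
--         if len(idx1) > 4:       # the first meld of a pair uses 3 or 4 cards
--             continue
--         for idx2 in melds:
--             if not all(i not in idx1 for i in idx2):
--                 continue
--             used = idx1 + idx2
--             rem = [hand[i] for i in range(n) if i not in used]
--             pen = sum(vpoints(c['v']) for c in rem)
--             if pen < best_pen:
--                 best_pen, best_rem = pen, rem
--     return best_pen, best_rem
-- ===== Notes on version B (the rewrite author's own statement) =====
-- stated objective: alternative
-- what changed: B precomputes the table of all meld index-subsets once (sizes ascending, lexicographic) and then scans single table entries and ordered disjoint pairs of table entries, instead of A's nested re-enumeration that re-tests every subset of every remainder for each first meld; traversal order and the strict-improvement tie-break are preserved, so the returned remainder is identical.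
import Mathlib
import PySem

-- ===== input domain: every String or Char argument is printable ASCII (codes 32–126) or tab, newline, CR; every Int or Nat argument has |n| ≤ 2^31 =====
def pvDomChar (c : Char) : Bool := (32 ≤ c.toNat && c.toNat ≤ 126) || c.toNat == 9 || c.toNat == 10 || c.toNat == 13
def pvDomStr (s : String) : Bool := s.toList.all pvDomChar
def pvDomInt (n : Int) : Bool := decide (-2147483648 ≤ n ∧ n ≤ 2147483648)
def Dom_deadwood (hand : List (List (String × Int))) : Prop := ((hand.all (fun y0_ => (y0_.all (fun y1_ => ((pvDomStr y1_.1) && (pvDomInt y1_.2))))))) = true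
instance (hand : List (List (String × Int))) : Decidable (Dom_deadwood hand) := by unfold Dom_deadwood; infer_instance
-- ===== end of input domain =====

-- B changes the decomposition: it builds the table of all melds (index subsets) once and
-- scans singles then ordered disjoint pairs of table entries, instead of A's re-enumeration
-- and re-testing of every subset of every remainder; same return value on Pre_.

-- ===== PORT A =====
-- shared helpers (module-level functions of Source A, used verbatim by both ports)

def pvVALUES : List Int := [1, 2, 3, 4, 5, 6, 7, 10, 11, 12]

-- {1:1,…}[v]; Pre_deadwood guarantees the key is present (a miss is Python's KeyError)
def pvVpoints (v : Int) : Int :=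
  ((PySem.Dict.mk [((1:Int),(1:Int)),(2,2),(3,3),(4,4),(5,5),(6,6),(7,7),(10,10),(11,10),(12,10)]).get? v).getD 0

-- c['v'] / c['s']: first-match lookup; Pre_deadwood guarantees the key is present where evaluated
def pvGetV (c : List (String × Int)) : Int := ((PySem.Dict.mk c).get? "v").getD 0
def pvGetS (c : List (String × Int)) : Int := ((PySem.Dict.mk c).get? "s").getD 0

-- VALUES.index(v); under Pre_deadwood v ∈ VALUES so index? is some
def pvRank (v : Int) : Int := (((PySem.List.index? pvVALUES v).getD 0 : Nat) : Int)

def pvIsGroup (cards : List (List (String × Int))) : Bool :=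
  decide (3 ≤ cards.length) && ((PySem.Set.ofList (cards.map pvGetV)).length == 1)

-- all(rnks[i+1] == rnks[i] + 1 for i in range(len(rnks)-1)): adjacent-successor chain
def pvChain : List Int → Bool
  | a :: b :: t => (b == a + 1) && pvChain (b :: t)
  | _ => true

def pvIsSequence (cards : List (List (String × Int))) : Bool :=
  if cards.length < 3 then false
  else if !((PySem.Set.ofList (cards.map pvGetS)).length == 1) then false
  else pvChain (PySem.List.sorted (cards.map (fun c => pvRank (pvGetV c))) (fun x => x) false)

def pvIsMeld (cards : List (List (String × Int))) : Bool :=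
  !cards.isEmpty && (pvIsGroup cards || pvIsSequence cards)

-- itertools.combinations(l, k): k-subsets in lexicographic order (exact enumeration order)
def pvCombos {α : Type} : List α → Nat → List (List α)
  | _, 0 => [[]]
  | [], _ + 1 => []
  | x :: xs, k + 1 => ((pvCombos xs k).map (fun c => x :: c)) ++ pvCombos xs (k + 1)

-- sum(vpoints(c['v']) for c in cards)
def pvSumPen (cards : List (List (String × Int))) : Int :=
  (cards.map (fun c => pvVpoints (pvGetV c))).sum

-- indices are Nat: every index A forms is in [0, len(hand)), so hand[i] = hand.getD i []
def deadwood (hand : List (List (String × Int))) : Int × (List (List (String × Int))) :=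
  let n := hand.length
  let st0 : Int × (List (List (String × Int))) := (pvSumPen hand, hand)
  let st1 := (List.range' 3 5).foldl (fun st sz =>
    (pvCombos (List.range n) sz).foldl (fun st idx =>
      let sub := idx.map (fun i => hand.getD i [])
      if pvIsMeld sub then
        let rem := ((List.range n).filter (fun i => !idx.contains i)).map (fun i => hand.getD i [])
        let pen := pvSumPen rem
        if pen < st.1 then (pen, rem) else st
      else st) st) st0
  (List.range' 3 2).foldl (fun st sz1 =>
    (pvCombos (List.range n) sz1).foldl (fun st idx1 =>
      let m1 := idx1.map (fun i => hand.getD i [])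
      if pvIsMeld m1 then
        let rem1 := (List.range n).filter (fun i => !idx1.contains i)
        (List.range' 3 (rem1.length - 2)).foldl (fun st sz2 =>
          (pvCombos (List.range rem1.length) sz2).foldl (fun st sub2 =>
            let m2 := (sub2.map (fun j => rem1.getD j 0)).map (fun i => hand.getD i [])
            if pvIsMeld m2 then
              -- used = set(idx1) | {…}: only membership is tested, so the concatenation is exact
              let used := idx1 ++ sub2.map (fun j => rem1.getD j 0)
              let rem := ((List.range n).filter (fun i => !used.contains i)).map (fun i => hand.getD i [])
              let pen := pvSumPen rem
              if pen < st.1 then (pen, rem) else st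
            else st) st) st
      else st) st) st1

-- ===== PORT B =====
def deadwood_alt (hand : List (List (String × Int))) : Int × (List (List (String × Int))) :=
  let n := hand.length
  let melds := (List.range' 3 (n - 2)).flatMap (fun sz =>
    (pvCombos (List.range n) sz).filter (fun idx => pvIsMeld (idx.map (fun i => hand.getD i []))))
  let st0 : Int × (List (List (String × Int))) := (pvSumPen hand, hand)
  let st1 := melds.foldl (fun st idx =>
    if idx.length ≤ 7 then
      let rem := ((List.range n).filter (fun i => !idx.contains i)).map (fun i => hand.getD i [])
      let pen := pvSumPen rem
      if pen < st.1 then (pen, rem) else st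
    else st) st0
  melds.foldl (fun st idx1 =>
    if idx1.length ≤ 4 then
      melds.foldl (fun st idx2 =>
        if idx2.all (fun i => !idx1.contains i) then
          let used := idx1 ++ idx2
          let rem := ((List.range n).filter (fun i => !used.contains i)).map (fun i => hand.getD i [])
          let pen := pvSumPen rem
          if pen < st.1 then (pen, rem) else st
        else st) st
    else st) st1

-- ===== PRECONDITION & SPEC =====
-- Pre_ is exactly where the Python A returns: every card's 'v' is a key of the points table
-- (else KeyError), and for a hand of ≥ 3 cards with two distinct values every card needs an
-- 's' key (some non-group 3-subset then evaluates c['s']; with all values equal it never is).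
def Pre_deadwood (hand : List (List (String × Int))) : Prop :=
  (∀ c ∈ hand, ((PySem.Dict.mk c).get? "v").any (fun v => pvVALUES.contains v) = true) ∧
  (3 ≤ hand.length →
    ((∀ c ∈ hand, ∀ c' ∈ hand, (PySem.Dict.mk c).get? "v" = (PySem.Dict.mk c').get? "v") ∨
     (∀ c ∈ hand, ((PySem.Dict.mk c).get? "s").isSome = true)))
instance (hand : List (List (String × Int))) : Decidable (Pre_deadwood hand) := by
  unfold Pre_deadwood; infer_instance

def pvWitness_deadwood : (List (List (String × Int))) :=
  [[("v", 1), ("s", 0)], [("v", 2), ("s", 0)], [("v", 3), ("s", 0)]]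

def Spec_deadwood (hand : List (List (String × Int))) (out : Int × (List (List (String × Int)))) : Prop := out = deadwood_alt hand
instance (hand : List (List (String × Int))) (out : Int × (List (List (String × Int)))) : Decidable (Spec_deadwood hand out) := by unfold Spec_deadwood; infer_instance

-- ===== CLAIM (what is proved, stated in full; the proofs are below) =====
def Claim_equal_deadwood : Prop := ∀ (hand : List (List (String × Int))), Dom_deadwood hand → Pre_deadwood hand → Spec_deadwood hand (deadwood hand)

-- ===== LEMMAS AND PROOFS =====

-- vocabulary shared by the two decompositions
def pvG (hand : List (List (String × Int))) (i : Nat) : List (String × Int) := hand.getD i []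

def pvMeldP (hand : List (List (String × Int))) (idx : List Nat) : Bool :=
  pvIsMeld (idx.map (pvG hand))

def pvUpd (hand : List (List (String × Int))) (st : Int × (List (List (String × Int)))) (used : List Nat) :
    Int × (List (List (String × Int))) :=
  let rem := ((List.range hand.length).filter (fun i => !used.contains i)).map (pvG hand)
  let pen := pvSumPen rem
  if pen < st.1 then (pen, rem) else st

def pvF (hand : List (List (String × Int))) (sz : Nat) : List (List Nat) :=
  (pvCombos (List.range hand.length) sz).filter (pvMeldP hand)

def pvMelds (hand : List (List (String × Int))) : List (List Nat) :=
  (List.range' 3 (hand.length - 2)).flatMap (pvF hand)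

def pvRem1 (hand : List (List (String × Int))) (idx1 : List Nat) : List Nat :=
  (List.range hand.length).filter (fun i => !idx1.contains i)

def pvPairsFor (hand : List (List (String × Int))) (idx1 : List Nat) : List (List Nat) :=
  (List.range' 3 ((pvRem1 hand idx1).length - 2)).flatMap (fun sz2 =>
    ((pvCombos (List.range (pvRem1 hand idx1).length) sz2).filter
        (fun s2 => pvMeldP hand (s2.map (fun j => (pvRem1 hand idx1).getD j 0)))).map
      (fun s2 => idx1 ++ s2.map (fun j => (pvRem1 hand idx1).getD j 0)))

def pvG2 (hand : List (List (String × Int))) (idx1 : List Nat) : List (List Nat) :=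
  ((pvMelds hand).filter (fun idx2 => idx2.all (fun i => !idx1.contains i))).map (fun c => idx1 ++ c)

def pvSA (hand : List (List (String × Int))) : List (List Nat) :=
  (List.range' 3 5).flatMap (pvF hand)

def pvPA (hand : List (List (String × Int))) : List (List Nat) :=
  (List.range' 3 2).flatMap (fun sz1 => (pvF hand sz1).flatMap (pvPairsFor hand))

def pvSB (hand : List (List (String × Int))) : List (List Nat) :=
  (pvMelds hand).filter (fun idx => idx.length ≤ 7)

def pvPB (hand : List (List (String × Int))) : List (List Nat) :=
  (pvMelds hand).flatMap (fun idx1 => if idx1.length ≤ 4 then pvG2 hand idx1 else [])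

-- combinatorial facts about pvCombos
theorem pvCombos_map {α β : Type} (f : α → β) : ∀ (l : List α) (k : Nat),
    pvCombos (l.map f) k = (pvCombos l k).map (List.map f) := by
  intro l
  induction l with
  | nil => intro k; cases k <;> simp [pvCombos]
  | cons x xs ih =>
    intro k
    cases k with
    | zero => simp [pvCombos]
    | succ k => simp [pvCombos, ih, List.map_map, Function.comp_def]

theorem pvCombos_filter {α : Type} (p : α → Bool) : ∀ (l : List α) (k : Nat),
    (pvCombos l k).filter (fun c => c.all p) = pvCombos (l.filter p) k := by
  intro l
  induction l with
  | nil => intro k; cases k <;> simp [pvCombos]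
  | cons x xs ih =>
    intro k
    cases k with
    | zero => simp [pvCombos]
    | succ k =>
      by_cases hx : p x
      · simp [pvCombos, hx, List.filter_append, List.filter_map, Function.comp_def, ← ih]
      · simp [pvCombos, hx, List.filter_append, List.filter_map, Function.comp_def, ← ih]

theorem pvCombos_eq_nil {α : Type} : ∀ (l : List α) (k : Nat), l.length < k → pvCombos l k = [] := by
  intro l
  induction l with
  | nil => intro k h; cases k with | zero => omega | succ k => simp [pvCombos]
  | cons x xs ih =>
    intro k h
    cases k with
    | zero => omega
    | succ k =>
      simp at h
      simp [pvCombos, ih k (by omega), ih (k+1) (by omega)]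

theorem pvLength_of_mem_combos {α : Type} : ∀ (l : List α) (k : Nat) (c : List α),
    c ∈ pvCombos l k → c.length = k := by
  intro l
  induction l with
  | nil =>
    intro k c h
    cases k with
    | zero => simp [pvCombos] at h; simp [h]
    | succ k => simp [pvCombos] at h
  | cons x xs ih =>
    intro k c h
    cases k with
    | zero => simp [pvCombos] at h; simp [h]
    | succ k =>
      simp [pvCombos] at h
      rcases h with ⟨c', hc', rfl⟩ | h
      · simp [ih k c' hc']
      · exact ih (k+1) c h

theorem pvMap_getD_range {α : Type} (l : List α) (d : α) :
    (List.range l.length).map (fun i => l.getD i d) = l := by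
  apply List.ext_getElem (by simp)
  intro i h1 h2
  simp [List.getD_eq_getElem?_getD, List.getElem?_eq_getElem h2]

theorem pvRangeTrunc {α : Type} (a c₁ c₂ : Nat) (g : Nat → List α) (h : c₁ ≤ c₂)
    (hnil : ∀ s, a + c₁ ≤ s → g s = []) :
    (List.range' a c₂).flatMap g = (List.range' a c₁).flatMap g := by
  have h2 : c₂ = c₁ + (c₂ - c₁) := by omega
  rw [h2, ← List.range'_append_1, List.flatMap_append]
  have h3 : (List.range' (a + c₁) (c₂ - c₁)).flatMap g = [] := by
    rw [List.flatMap_eq_nil_iff]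
    intro s hs
    exact hnil s (List.mem_range'_1.mp hs).1
  simp [h3]

theorem pvF_eq_nil (hand : List (List (String × Int))) (sz : Nat) (h : hand.length < sz) :
    pvF hand sz = [] := by
  unfold pvF
  rw [pvCombos_eq_nil _ sz (by simpa using h)]
  simp

theorem pvLen_of_mem_F (hand : List (List (String × Int))) (sz : Nat) (idx : List Nat)
    (h : idx ∈ pvF hand sz) : idx.length = sz := by
  unfold pvF at h
  exact pvLength_of_mem_combos _ _ _ (List.mem_of_mem_filter h)

-- list-level equality of the two singles scans
theorem pvS_eq (hand : List (List (String × Int))) : pvSA hand = pvSB hand := by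
  have hsb : pvSB hand = (List.range' 3 (hand.length - 2)).flatMap
      (fun sz => if sz ≤ 7 then pvF hand sz else []) := by
    unfold pvSB pvMelds
    rw [List.filter_flatMap]
    apply List.flatMap_congr
    intro sz _
    by_cases h7 : sz ≤ 7
    · rw [if_pos h7, List.filter_eq_self.mpr]
      intro idx hidx
      simp [pvLen_of_mem_F hand sz idx hidx, h7]
    · rw [if_neg h7, List.filter_eq_nil_iff.mpr]
      intro idx hidx
      simp [pvLen_of_mem_F hand sz idx hidx, h7]
  rw [hsb]
  by_cases hc : hand.length - 2 ≤ 5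
  · have hA : pvSA hand = (List.range' 3 (hand.length - 2)).flatMap (pvF hand) := by
      unfold pvSA
      exact pvRangeTrunc 3 (hand.length - 2) 5 _ hc (fun s hs => pvF_eq_nil hand s (by omega))
    rw [hA]
    apply List.flatMap_congr
    intro sz hsz
    have hb := (List.mem_range'_1.mp hsz)
    rw [if_pos (by omega)]
  · have hsplit : hand.length - 2 = 5 + (hand.length - 7) := by omega
    rw [hsplit, ← List.range'_append_1, List.flatMap_append]
    have h2 : (List.range' (3 + 5) (hand.length - 7)).flatMap
        (fun sz => if sz ≤ 7 then pvF hand sz else []) = [] := by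
      rw [List.flatMap_eq_nil_iff]
      intro s hs
      have := (List.mem_range'_1.mp hs).1
      rw [if_neg (by omega)]
    have h1 : (List.range' 3 5).flatMap (fun sz => if sz ≤ 7 then pvF hand sz else [])
        = pvSA hand := by
      unfold pvSA
      apply List.flatMap_congr
      intro sz hsz
      have := (List.mem_range'_1.mp hsz).2
      rw [if_pos (by omega)]
    rw [h1, h2, List.append_nil]

theorem pvPairsFor_eq (hand : List (List (String × Int))) (idx1 : List Nat) :
    pvPairsFor hand idx1 = pvG2 hand idx1 := by
  have hA : ∀ (r : List Nat) (sz2 : Nat),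
      ((pvCombos (List.range r.length) sz2).filter
          (fun s2 => pvMeldP hand (s2.map (fun j => r.getD j 0)))).map
        (fun s2 => idx1 ++ s2.map (fun j => r.getD j 0))
      = ((pvCombos r sz2).filter (pvMeldP hand)).map (fun c => idx1 ++ c) := by
    intro r sz2
    conv_rhs => rw [show r = (List.range r.length).map (fun i => r.getD i 0) from
      (pvMap_getD_range r 0).symm]
    rw [pvCombos_map, List.filter_map, List.map_map]
    simp [Function.comp_def]
  have hlen : (pvRem1 hand idx1).length ≤ hand.length := by
    unfold pvRem1
    exact le_trans (List.length_filter_le _ _) (by simp)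
  have hg2 : pvG2 hand idx1 = (List.range' 3 (hand.length - 2)).flatMap
      (fun sz2 => ((pvCombos (pvRem1 hand idx1) sz2).filter (pvMeldP hand)).map
        (fun c => idx1 ++ c)) := by
    unfold pvG2 pvMelds
    rw [List.filter_flatMap, List.map_flatMap]
    apply List.flatMap_congr
    intro sz2 _
    congr 1
    unfold pvF
    rw [List.filter_comm]
    congr 1
    unfold pvRem1
    rw [← pvCombos_filter]
  calc pvPairsFor hand idx1
      = (List.range' 3 ((pvRem1 hand idx1).length - 2)).flatMap
          (fun sz2 => ((pvCombos (pvRem1 hand idx1) sz2).filter (pvMeldP hand)).map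
            (fun c => idx1 ++ c)) := by
        unfold pvPairsFor
        exact List.flatMap_congr (fun sz2 _ => hA (pvRem1 hand idx1) sz2)
    _ = (List.range' 3 (hand.length - 2)).flatMap
          (fun sz2 => ((pvCombos (pvRem1 hand idx1) sz2).filter (pvMeldP hand)).map
            (fun c => idx1 ++ c)) := by
        refine (pvRangeTrunc 3 ((pvRem1 hand idx1).length - 2) (hand.length - 2) _
          (by omega) (fun s hs => ?_)).symm
        rw [pvCombos_eq_nil (pvRem1 hand idx1) s (by omega), List.filter_nil, List.map_nil]
    _ = pvG2 hand idx1 := hg2.symm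

-- list-level equality of the two pair scans
theorem pvP_eq (hand : List (List (String × Int))) : pvPA hand = pvPB hand := by
  have hb : pvPB hand = (List.range' 3 (hand.length - 2)).flatMap
      (fun sz1 => if sz1 ≤ 4 then (pvF hand sz1).flatMap (pvG2 hand) else []) := by
    unfold pvPB pvMelds
    rw [List.flatMap_assoc]
    apply List.flatMap_congr
    intro sz1 _
    by_cases h4 : sz1 ≤ 4
    · rw [if_pos h4]
      apply List.flatMap_congr
      intro idx1 hidx1
      rw [if_pos (by rw [pvLen_of_mem_F hand sz1 idx1 hidx1]; exact h4)]
    · rw [if_neg h4, List.flatMap_eq_nil_iff]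
      intro idx1 hidx1
      rw [if_neg (by rw [pvLen_of_mem_F hand sz1 idx1 hidx1]; exact h4)]
  have ha : pvPA hand = (List.range' 3 2).flatMap
      (fun sz1 => (pvF hand sz1).flatMap (pvG2 hand)) := by
    unfold pvPA
    apply List.flatMap_congr
    intro sz1 _
    exact List.flatMap_congr (fun idx1 _ => pvPairsFor_eq hand idx1)
  rw [hb, ha]
  by_cases hc : hand.length - 2 ≤ 2
  · have h1 : (List.range' 3 (hand.length - 2)).flatMap
        (fun sz1 => if sz1 ≤ 4 then (pvF hand sz1).flatMap (pvG2 hand) else [])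
        = (List.range' 3 (hand.length - 2)).flatMap
        (fun sz1 => (pvF hand sz1).flatMap (pvG2 hand)) := by
      apply List.flatMap_congr
      intro sz1 hsz
      have hb2 := List.mem_range'_1.mp hsz
      rw [if_pos (by omega)]
    rw [h1]
    exact pvRangeTrunc 3 (hand.length - 2) 2 _ hc
      (fun s hs => by rw [pvF_eq_nil hand s (by omega), List.flatMap_nil])
  · have hsplit : hand.length - 2 = 2 + (hand.length - 4) := by omega
    rw [hsplit, ← List.range'_append_1, List.flatMap_append]
    have h2 : (List.range' (3 + 2) (hand.length - 4)).flatMap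
        (fun sz1 => if sz1 ≤ 4 then (pvF hand sz1).flatMap (pvG2 hand) else []) = [] := by
      rw [List.flatMap_eq_nil_iff]
      intro sz1 hsz
      have := (List.mem_range'_1.mp hsz).1
      rw [if_neg (by omega)]
    have h1 : (List.range' 3 2).flatMap
        (fun sz1 => if sz1 ≤ 4 then (pvF hand sz1).flatMap (pvG2 hand) else [])
        = (List.range' 3 2).flatMap (fun sz1 => (pvF hand sz1).flatMap (pvG2 hand)) := by
      apply List.flatMap_congr
      intro sz1 hsz
      have := (List.mem_range'_1.mp hsz).2
      rw [if_pos (by omega)]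
    rw [h1, h2, List.append_nil]

theorem pvA_eq (hand : List (List (String × Int))) :
    deadwood hand = (pvSA hand ++ pvPA hand).foldl (pvUpd hand) (pvSumPen hand, hand) := by
  rw [List.foldl_append]
  show (List.range' 3 2).foldl
      (fun st sz1 => (pvCombos (List.range hand.length) sz1).foldl
        (fun st idx1 => if pvMeldP hand idx1 then
            (List.range' 3 ((pvRem1 hand idx1).length - 2)).foldl
              (fun st sz2 => (pvCombos (List.range (pvRem1 hand idx1).length) sz2).foldl
                (fun st sub2 =>
                  if pvMeldP hand (sub2.map (fun j => (pvRem1 hand idx1).getD j 0)) then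
                    pvUpd hand st (idx1 ++ sub2.map (fun j => (pvRem1 hand idx1).getD j 0))
                  else st) st) st
          else st) st)
      ((List.range' 3 5).foldl
        (fun st sz => (pvCombos (List.range hand.length) sz).foldl
          (fun st idx => if pvMeldP hand idx then pvUpd hand st idx else st) st)
        (pvSumPen hand, hand))
    = (pvPA hand).foldl (pvUpd hand) ((pvSA hand).foldl (pvUpd hand) (pvSumPen hand, hand))
  have hsingle : (List.range' 3 5).foldl
      (fun st sz => (pvCombos (List.range hand.length) sz).foldl
        (fun st idx => if pvMeldP hand idx then pvUpd hand st idx else st) st)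
      (pvSumPen hand, hand)
      = (pvSA hand).foldl (pvUpd hand) (pvSumPen hand, hand) := by
    unfold pvSA
    rw [List.foldl_flatMap]
    have hf : (fun (st : Int × (List (List (String × Int)))) (sz : Nat) =>
        (pvCombos (List.range hand.length) sz).foldl
          (fun st idx => if pvMeldP hand idx then pvUpd hand st idx else st) st)
        = (fun st sz => (pvF hand sz).foldl (pvUpd hand) st) := by
      funext st sz
      rw [PySem.List.foldl_if_eq_foldl_filter (pvMeldP hand) (pvUpd hand)]
      rfl
    rw [hf]
  rw [hsingle]
  have hinner : ∀ (idx1 : List Nat) (st : Int × (List (List (String × Int)))),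
      (List.range' 3 ((pvRem1 hand idx1).length - 2)).foldl
        (fun st sz2 => (pvCombos (List.range (pvRem1 hand idx1).length) sz2).foldl
          (fun st sub2 =>
            if pvMeldP hand (sub2.map (fun j => (pvRem1 hand idx1).getD j 0)) then
              pvUpd hand st (idx1 ++ sub2.map (fun j => (pvRem1 hand idx1).getD j 0))
            else st) st) st
      = (pvPairsFor hand idx1).foldl (pvUpd hand) st := by
    intro idx1 st
    unfold pvPairsFor
    rw [List.foldl_flatMap]
    have hf : (fun (st : Int × (List (List (String × Int)))) (sz2 : Nat) =>
        (pvCombos (List.range (pvRem1 hand idx1).length) sz2).foldl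
          (fun st sub2 =>
            if pvMeldP hand (sub2.map (fun j => (pvRem1 hand idx1).getD j 0)) then
              pvUpd hand st (idx1 ++ sub2.map (fun j => (pvRem1 hand idx1).getD j 0))
            else st) st)
        = (fun st sz2 => (((pvCombos (List.range (pvRem1 hand idx1).length) sz2).filter
            (fun s2 => pvMeldP hand (s2.map (fun j => (pvRem1 hand idx1).getD j 0)))).map
              (fun s2 => idx1 ++ s2.map (fun j => (pvRem1 hand idx1).getD j 0))).foldl
            (pvUpd hand) st) := by
      funext st sz2
      rw [PySem.List.foldl_if_eq_foldl_filter
        (fun s2 : List Nat => pvMeldP hand (s2.map (fun j => (pvRem1 hand idx1).getD j 0)))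
        (fun (st : Int × (List (List (String × Int)))) (s2 : List Nat) =>
          pvUpd hand st (idx1 ++ s2.map (fun j => (pvRem1 hand idx1).getD j 0))),
        List.foldl_map]
    rw [hf]
  have hpairfun : (fun (st : Int × (List (List (String × Int)))) (sz1 : Nat) =>
      (pvCombos (List.range hand.length) sz1).foldl
        (fun st idx1 => if pvMeldP hand idx1 then
            (List.range' 3 ((pvRem1 hand idx1).length - 2)).foldl
              (fun st sz2 => (pvCombos (List.range (pvRem1 hand idx1).length) sz2).foldl
                (fun st sub2 =>
                  if pvMeldP hand (sub2.map (fun j => (pvRem1 hand idx1).getD j 0)) then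
                    pvUpd hand st (idx1 ++ sub2.map (fun j => (pvRem1 hand idx1).getD j 0))
                  else st) st) st
          else st) st)
      = (fun st sz1 => ((pvF hand sz1).flatMap (pvPairsFor hand)).foldl (pvUpd hand) st) := by
    funext st sz1
    rw [List.foldl_flatMap]
    have hg : (fun (st : Int × (List (List (String × Int)))) (idx1 : List Nat) =>
        if pvMeldP hand idx1 then
          (List.range' 3 ((pvRem1 hand idx1).length - 2)).foldl
            (fun st sz2 => (pvCombos (List.range (pvRem1 hand idx1).length) sz2).foldl
              (fun st sub2 =>
                if pvMeldP hand (sub2.map (fun j => (pvRem1 hand idx1).getD j 0)) then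
                  pvUpd hand st (idx1 ++ sub2.map (fun j => (pvRem1 hand idx1).getD j 0))
                else st) st) st
        else st)
        = (fun st idx1 => if pvMeldP hand idx1 then
            (pvPairsFor hand idx1).foldl (pvUpd hand) st else st) := by
      funext st idx1
      by_cases hm : pvMeldP hand idx1
      · rw [if_pos hm, if_pos hm, hinner idx1 st]
      · rw [if_neg hm, if_neg hm]
    rw [hg, PySem.List.foldl_if_eq_foldl_filter (pvMeldP hand)
      (fun st idx1 => (pvPairsFor hand idx1).foldl (pvUpd hand) st)]
    rfl
  rw [hpairfun]
  unfold pvPA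
  rw [List.foldl_flatMap]

-- B's table scans are the fold of pvUpd over pvSB ++ pvPB
theorem pvB_eq (hand : List (List (String × Int))) :
    deadwood_alt hand = (pvSB hand ++ pvPB hand).foldl (pvUpd hand) (pvSumPen hand, hand) := by
  rw [List.foldl_append]
  show (pvMelds hand).foldl
      (fun st idx1 => if idx1.length ≤ 4 then
          (pvMelds hand).foldl
            (fun st idx2 => if idx2.all (fun i => !idx1.contains i) then
                pvUpd hand st (idx1 ++ idx2)
              else st) st
        else st)
      ((pvMelds hand).foldl
        (fun st idx => if idx.length ≤ 7 then pvUpd hand st idx else st)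
        (pvSumPen hand, hand))
    = (pvPB hand).foldl (pvUpd hand) ((pvSB hand).foldl (pvUpd hand) (pvSumPen hand, hand))
  have hs : (pvMelds hand).foldl
      (fun st idx => if idx.length ≤ 7 then pvUpd hand st idx else st) (pvSumPen hand, hand)
      = (pvSB hand).foldl (pvUpd hand) (pvSumPen hand, hand) := by
    rw [PySem.List.foldl_ite_eq_foldl_filter (fun idx : List Nat => idx.length ≤ 7) (pvUpd hand)]
    rfl
  rw [hs]
  have hfun : (fun (st : Int × (List (List (String × Int)))) (idx1 : List Nat) =>
      if idx1.length ≤ 4 then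
        (pvMelds hand).foldl
          (fun st idx2 => if idx2.all (fun i => !idx1.contains i) then
              pvUpd hand st (idx1 ++ idx2)
            else st) st
      else st)
      = (fun st idx1 => (if idx1.length ≤ 4 then pvG2 hand idx1 else []).foldl (pvUpd hand) st) := by
    funext st idx1
    by_cases h4 : idx1.length ≤ 4
    · rw [if_pos h4, if_pos h4,
        PySem.List.foldl_if_eq_foldl_filter (fun idx2 : List Nat => idx2.all (fun i => !idx1.contains i))
          (fun (st : Int × (List (List (String × Int)))) (idx2 : List Nat) =>
            pvUpd hand st (idx1 ++ idx2))]
      unfold pvG2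
      rw [List.foldl_map]
    · rw [if_neg h4, if_neg h4]
      rfl
  rw [hfun]
  unfold pvPB
  rw [List.foldl_flatMap]

-- ===== VERDICT (by name: the statement is the Claim_ definition above) =====
theorem deadwood_spec : Claim_equal_deadwood := by
  intro hand _ _
  unfold Spec_deadwood
  rw [pvA_eq, pvB_eq, pvS_eq, pvP_eq]
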